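-- pv_equiv track=rewrite | github.com/vedantk91/Chips_Measurements | Plot_single_steps.py | generate_step_diagram
-- ===== SOURCE A (Python) =====
-- def generate_step_diagram(data):
--     x = [0]
--     y = [0]
--     for i in range(1, len(data)):
--         x.append(x[-1])
--         if (data[i] > data [i-1]):
--             y.append(y[-1] + 1)
--         else:
--             y.append(y[-1] - 1)
--         x.append(x[-1] + 1)
--         y.append(y[-1])
--     return x, y
-- ===== SOURCE B (Python) =====
-- def generate_step_diagram(data):
--     deltas = [1 if b > a else -1 for a, b in zip(data, data[1:])]
--     levels = []
--     s = 0
--     for d in deltas: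
--         s += d
--         levels.append(s)
--     x = [0] + [v for j in range(len(deltas)) for v in (j, j + 1)]
--     y = [0] + [v for lv in levels for v in (lv, lv)]
--     return x, y
-- ===== Notes on version B (the rewrite author's own statement) =====
-- stated objective: alternative
-- what changed: Replaces the single stateful loop that grows x and y via negative indexing (x[-1], y[-1]) with three flat passes: a zip-comprehension of +/-1 deltas, a prefix-sum accumulation of levels, and index/level interleavings assembled directly.
import Mathlib
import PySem

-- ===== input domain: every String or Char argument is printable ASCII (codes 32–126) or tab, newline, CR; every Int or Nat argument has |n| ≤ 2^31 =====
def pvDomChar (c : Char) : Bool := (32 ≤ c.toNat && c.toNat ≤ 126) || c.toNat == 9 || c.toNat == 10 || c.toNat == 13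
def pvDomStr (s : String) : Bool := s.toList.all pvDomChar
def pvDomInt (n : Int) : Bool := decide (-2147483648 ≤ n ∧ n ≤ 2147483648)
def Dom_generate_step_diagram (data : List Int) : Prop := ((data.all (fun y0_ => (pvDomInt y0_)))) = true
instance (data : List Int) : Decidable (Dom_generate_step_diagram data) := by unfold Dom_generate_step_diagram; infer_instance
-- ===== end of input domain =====

-- B replaces A's single stateful loop (growing x and y via negative indexing x[-1]/y[-1]) by three flat
-- passes: zip-comprehension deltas, prefix-sum levels, direct interleaved assembly (alternative decomposition, same cost).

-- ===== PORT A =====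
def generate_step_diagram (data : List Int) : List Int × List Int :=
  (PySem.List.pyRange 1 (data.length : Int) 1).foldl
    (fun (st : List Int × List Int) i =>
      let x := st.1
      let y := st.2
      let x := x ++ [PySem.List.pyGetD x (-1) 0]
      let y := if PySem.List.pyGetD data i 0 > PySem.List.pyGetD data (i - 1) 0
               then y ++ [PySem.List.pyGetD y (-1) 0 + 1]
               else y ++ [PySem.List.pyGetD y (-1) 0 - 1]
      let x := x ++ [PySem.List.pyGetD x (-1) 0 + 1]
      let y := y ++ [PySem.List.pyGetD y (-1) 0]
      (x, y))
    ([0], [0])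

-- ===== PORT B =====
-- running prefix sums: the `for d in deltas: s += d; levels.append(s)` loop of Source B
def pvAccum : Int → List Int → List Int
  | _, [] => []
  | s, d :: ds => (s + d) :: pvAccum (s + d) ds

def generate_step_diagram_alt (data : List Int) : List Int × List Int :=
  let deltas := List.zipWith (fun a b => if b > a then (1 : Int) else -1) data data.tail
  let levels := pvAccum 0 deltas
  let x := 0 :: (List.range deltas.length).flatMap (fun (j : Nat) => [(j : Int), (j : Int) + 1])
  let y := 0 :: levels.flatMap (fun lv => [lv, lv])
  (x, y)

-- ===== PRECONDITION & SPEC =====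
def Spec_generate_step_diagram (data : List Int) (out : List Int × List Int) : Prop := out = generate_step_diagram_alt data
instance (data : List Int) (out : List Int × List Int) : Decidable (Spec_generate_step_diagram data out) := by unfold Spec_generate_step_diagram; infer_instance

-- ===== CLAIM (what is proved, stated in full; the proofs are below) =====
def Claim_equal_generate_step_diagram : Prop := ∀ (data : List Int), Dom_generate_step_diagram data → Spec_generate_step_diagram data (generate_step_diagram data)

-- ===== LEMMAS AND PROOFS =====

lemma pv_xlast (m : Nat) :
    PySem.List.pyGetD (0 :: (List.range m).flatMap (fun (j : Nat) => [(j : Int), (j : Int) + 1])) (-1) 0 = (m : Int) := by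
  cases m with
  | zero => decide
  | succ k =>
      rw [List.range_succ, List.flatMap_append, List.flatMap_singleton]
      have h : (0 : Int) :: ((List.range k).flatMap (fun (j : Nat) => [(j : Int), (j : Int) + 1]) ++ [(k : Int), (k : Int) + 1])
          = ((0 : Int) :: ((List.range k).flatMap (fun (j : Nat) => [(j : Int), (j : Int) + 1]) ++ [(k : Int)])) ++ [(k : Int) + 1] := by
        simp
      rw [h, PySem.List.pyGetD_neg_one_append_singleton]
      push_cast; ring

lemma pv_last (l : List Int) (a : Int) : PySem.List.pyGetD (a :: l) (-1) 0 = (a :: l).getLastD 0 := by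
  rw [PySem.List.pyGetD_neg_one _ _ (by simp)]
  exact Int.neg_inj.mp rfl

lemma pv_dup_last (l : List Int) (d : Int) :
    (l.flatMap (fun lv => [lv, lv])).getLastD d = l.getLastD d := by
  induction l generalizing d with
  | nil => rfl
  | cons v t ih =>
      rw [List.flatMap_cons]
      show (v :: v :: List.flatMap _ t).getLastD d = _
      rw [List.getLastD_cons, List.getLastD_cons, ih, List.getLastD_cons]

lemma pv_accum_last (l : List Int) (s : Int) :
    (pvAccum s l).getLastD s = s + l.sum := by
  induction l generalizing s with
  | nil => simp [pvAccum]
  | cons d ds ih => rw [pvAccum, List.getLastD_cons, ih, List.sum_cons]; ring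

lemma pv_ylast (l : List Int) :
    PySem.List.pyGetD (0 :: (pvAccum 0 l).flatMap (fun lv => [lv, lv])) (-1) 0 = l.sum := by
  rw [pv_last, List.getLastD_cons, pv_dup_last, pv_accum_last]
  ring

lemma pv_accum_append (l : List Int) (s d : Int) :
    pvAccum s (l ++ [d]) = pvAccum s l ++ [s + l.sum + d] := by
  induction l generalizing s with
  | nil => simp [pvAccum]
  | cons a t ih =>
      rw [List.cons_append, pvAccum, pvAccum, ih, List.cons_append, List.sum_cons]
      have h : s + a + t.sum + d = s + (a + t.sum) + d := by ring
      rw [h]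

lemma pv_main (data : List Int) (k : Nat) (hk : k + 1 ≤ data.length) :
    (PySem.List.pyRange 1 (1 + (k : Int)) 1).foldl
      (fun (st : List Int × List Int) i =>
        let x := st.1
        let y := st.2
        let x := x ++ [PySem.List.pyGetD x (-1) 0]
        let y := if PySem.List.pyGetD data i 0 > PySem.List.pyGetD data (i - 1) 0
                 then y ++ [PySem.List.pyGetD y (-1) 0 + 1]
                 else y ++ [PySem.List.pyGetD y (-1) 0 - 1]
        let x := x ++ [PySem.List.pyGetD x (-1) 0 + 1]
        let y := y ++ [PySem.List.pyGetD y (-1) 0]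
        (x, y))
      ([0], [0]) =
    (0 :: (List.range k).flatMap (fun (j : Nat) => [(j : Int), (j : Int) + 1]),
     0 :: (pvAccum 0 ((List.zipWith (fun a b => if b > a then (1 : Int) else -1) data data.tail).take k)).flatMap (fun lv => [lv, lv])) := by
  induction k with
  | zero =>
      rw [PySem.List.pyRange_one_eq_nil (by omega)]
      simp [pvAccum]
  | succ k ih =>
      have hds : k < (List.zipWith (fun a b => if b > a then (1 : Int) else -1) data data.tail).length := by
        rw [List.length_zipWith, List.length_tail]; omega
      have hcast : (1 : Int) + ((k + 1 : Nat) : Int) = (1 + (k : Int)) + 1 := by push_cast; ring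
      rw [hcast, PySem.List.pyRange_one_succ_right (by omega), List.foldl_append,
        ih (by omega), List.foldl_cons, List.foldl_nil]
      simp only []
      rw [pv_xlast, pv_ylast]
      have hi1 : PySem.List.pyGetD data (1 + (k : Int)) 0 = data[k + 1]'(by omega) := by
        rw [PySem.List.pyGetD_eq_getElem data 0 (by omega) (by omega)]
        congr 1; omega
      have hi0 : PySem.List.pyGetD data (1 + (k : Int) - 1) 0 = data[k]'(by omega) := by
        rw [PySem.List.pyGetD_eq_getElem data 0 (by omega) (by omega)]
        congr 1; omega
      rw [hi1, hi0]
      have hdk : (List.zipWith (fun a b => if b > a then (1 : Int) else -1) data data.tail)[k]'hds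
          = if data[k + 1]'(by omega) > data[k]'(by omega) then (1 : Int) else -1 := by
        simp only [List.getElem_zipWith, List.getElem_tail]
      have htake : (List.zipWith (fun a b => if b > a then (1 : Int) else -1) data data.tail).take (k + 1)
          = (List.zipWith (fun a b => if b > a then (1 : Int) else -1) data data.tail).take k
            ++ [if data[k + 1]'(by omega) > data[k]'(by omega) then (1 : Int) else -1] := by
        rw [List.take_add_one, List.getElem?_eq_getElem hds, hdk, Option.toList_some]
      rw [htake, pv_accum_append, List.range_succ, List.flatMap_append, List.flatMap_singleton,
        List.flatMap_append, List.flatMap_singleton]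
      split_ifs with hgt
      · rw [PySem.List.pyGetD_neg_one_append_singleton, PySem.List.pyGetD_neg_one_append_singleton]
        simp [List.append_assoc]
      · rw [PySem.List.pyGetD_neg_one_append_singleton, PySem.List.pyGetD_neg_one_append_singleton]
        simp [List.append_assoc, sub_eq_add_neg]

-- ===== VERDICT (by name: the statement is the Claim_ definition above) =====
theorem generate_step_diagram_spec : Claim_equal_generate_step_diagram := by
  intro data _
  show generate_step_diagram data = generate_step_diagram_alt data
  cases data with
  | nil => rfl
  | cons a t =>
      unfold generate_step_diagram generate_step_diagram_alt
      simp only []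
      have hlen : (((a :: t).length : Nat) : Int) = 1 + ((t.length : Nat) : Int) := by
        simp [List.length_cons]; ring
      have hds : (List.zipWith (fun a b => if b > a then (1 : Int) else -1) (a :: t) (a :: t).tail).length = t.length := by
        simp [List.length_zipWith]
      rw [hlen, pv_main (a :: t) t.length (by simp), hds,
        List.take_of_length_le (le_of_eq hds)]
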